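-- pv_equiv track=rewrite | github.com/ai4cyber-slab/ai4fix | aifix.py | replace_diff_paths
-- ===== SOURCE A (Python) =====
-- def replace_diff_paths(diff_content, relative_path):
--     lines = diff_content.split('\n')
--     new_lines = []
--     for line in lines:
--         if line.startswith('--- ') or line.startswith('+++ '):
--             parts = line.split(' ')
--             if len(parts) > 1:
--                 new_lines.append(parts[0] + ' ' + relative_path)
--             else:
--                 new_lines.append(line)
--         else:
--             new_lines.append(line)
--     return '\n'.join(new_lines)
-- ===== SOURCE B (Python) =====
-- import re
--
-- def replace_diff_paths(diff_content, relative_path):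
--     # Single regex pass over the whole string: every multiline-anchored header line
--     # is rewritten to its captured 4-char prefix plus relative_path.  A callable
--     # replacement inserts relative_path literally (no template escapes).
--     return re.sub(r'(?m)^(--- |\+\+\+ ).*$',
--                   lambda m: m.group(1) + relative_path,
--                   diff_content)
-- ===== Notes on version B (the rewrite author's own statement) =====
-- stated objective: idiomatic
-- what changed: Replaces the split-into-lines / per-line loop with a second split(' ') / join pipeline by a single re.sub over the whole string with a multiline-anchored pattern and a callable replacement that rewrites each header line to its captured 4-char prefix plus relative_path.
import Mathlib
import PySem

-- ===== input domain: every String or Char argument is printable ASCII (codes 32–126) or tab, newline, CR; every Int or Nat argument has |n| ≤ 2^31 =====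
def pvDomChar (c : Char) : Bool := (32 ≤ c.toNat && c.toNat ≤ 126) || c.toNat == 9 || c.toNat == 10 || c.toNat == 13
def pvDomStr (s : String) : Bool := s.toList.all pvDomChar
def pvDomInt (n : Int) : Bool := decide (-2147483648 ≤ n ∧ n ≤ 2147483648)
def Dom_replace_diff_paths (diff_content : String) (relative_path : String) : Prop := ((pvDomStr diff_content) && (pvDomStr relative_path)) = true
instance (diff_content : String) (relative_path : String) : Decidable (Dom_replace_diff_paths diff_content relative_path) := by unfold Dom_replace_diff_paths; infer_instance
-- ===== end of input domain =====

-- B replaces A's split-into-lines / per-line split(' ') / join pipeline by one regex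
-- substitution (re.sub, multiline anchors, callable replacement) over the whole string
-- (idiomatic; same cost).


-- ===== PORT A =====
-- A: lines = diff_content.split('\n'); loop appending transformed lines; '\n'.join.
-- split('\n') has a non-empty separator, so Python's split never raises: .getD [] is
-- never taken.  parts[0] on a list produced by split is always present (split returns
-- a non-empty list), so the .getD "" default of pyGet? is never taken either.
def replace_diff_paths (diff_content : String) (relative_path : String) : String :=
  let lines := (PySem.Str.split? diff_content "\n").getD []
  let new_lines := lines.foldl
    (fun acc line =>
      if PySem.Str.startswith line "--- " || PySem.Str.startswith line "+++ " then
        let parts := (PySem.Str.split? line " ").getD []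
        if parts.length > 1 then
          acc ++ [((PySem.List.pyGet? parts 0).getD "") ++ " " ++ relative_path]
        else
          acc ++ [line]
      else
        acc ++ [line])
    []
  PySem.Str.join "\n" new_lines

-- ===== PORT B =====
-- B (Source B): re.sub(r'(?m)^(--- |\+\+\+ ).*$', lambda m: m.group(1) + relative_path, s).
-- Hand port of re.sub with THIS pattern (PySem has no regex), exact on all inputs:
-- the engine scans left to right; '^' matches only at the string start or right after
-- a '\n' (tracked by atStart); at such a position the alternation '(--- |+++ )' matches
-- iff the next 4 chars are that prefix, '.*$' then consumes to the next '\n' (or the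
-- end — '.' does not cross newlines), and the callable emits group(1) ++ relative_path;
-- at any other position (or on failure) one char is copied and scanning continues.
def pvReSub (r : List Char) (atStart : Bool) : List Char → List Char
  | [] => []
  | c :: rest =>
    if h : atStart = true ∧ ((c :: rest).take 4 = "--- ".toList ∨ (c :: rest).take 4 = "+++ ".toList) then
      (c :: rest).take 4 ++ r ++ pvReSub r false ((c :: rest).dropWhile (· ≠ '\n'))
    else c :: pvReSub r (c = '\n') rest
termination_by cs => cs.length
decreasing_by
  · have hc : c ≠ '\n' := by
      intro hc; subst hc
      rcases h.2 with h2 | h2 <;> simp at h2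
    rw [List.dropWhile_cons_of_pos (by simpa using hc)]
    have h1 := List.length_dropWhile_le (fun x => decide (x ≠ '\n')) rest
    simp at h1 ⊢
    omega
  · simp
def replace_diff_paths_alt (diff_content : String) (relative_path : String) : String :=
  String.ofList (pvReSub relative_path.toList true diff_content.toList)

-- ===== PRECONDITION & SPEC =====
def Spec_replace_diff_paths (diff_content : String) (relative_path : String) (out : String) : Prop := out = replace_diff_paths_alt diff_content relative_path
instance (diff_content : String) (relative_path : String) (out : String) : Decidable (Spec_replace_diff_paths diff_content relative_path out) := by unfold Spec_replace_diff_paths; infer_instance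

-- ===== CLAIM (what is proved, stated in full; the proofs are below) =====
def Claim_equal_replace_diff_paths : Prop := ∀ (diff_content : String) (relative_path : String), Dom_replace_diff_paths diff_content relative_path → Spec_replace_diff_paths diff_content relative_path (replace_diff_paths diff_content relative_path)

-- ===== LEMMAS AND PROOFS =====

-- Characterisation of A: a line-at-a-time scan (proof intermediate between the two ports).
def pvScan (r : List Char) (cs : List Char) : List Char :=
  let line := cs.takeWhile (· ≠ '\n')
  let out := if line.take 4 = "--- ".toList ∨ line.take 4 = "+++ ".toList
             then line.take 4 ++ r else line
  match h : cs.dropWhile (· ≠ '\n') with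
  | [] => out
  | _ :: rest => out ++ '\n' :: pvScan r rest
termination_by cs.length
decreasing_by
  have h1 : (cs.dropWhile (· ≠ '\n')).length ≤ cs.length := List.length_dropWhile_le _ _
  rw [h] at h1; simp at h1; omega

def pvSplit1 (sep : Char) : List Char → List Char × List (List Char)
  | [] => ([], [])
  | c :: rest =>
    if c = sep then ([], (pvSplit1 sep rest).1 :: (pvSplit1 sep rest).2)
    else (c :: (pvSplit1 sep rest).1, (pvSplit1 sep rest).2)

theorem pvSplit1_fst (sep : Char) (cs : List Char) :
    (pvSplit1 sep cs).1 = cs.takeWhile (· ≠ sep) := by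
  induction cs with
  | nil => simp [pvSplit1]
  | cons c rest ih =>
    by_cases h : c = sep <;> simp [pvSplit1, h, ih]

theorem pvSplit1_snd (sep : Char) (cs : List Char) :
    (pvSplit1 sep cs).2 =
      match cs.dropWhile (· ≠ sep) with
      | [] => ([] : List (List Char))
      | _ :: rest => (pvSplit1 sep rest).1 :: (pvSplit1 sep rest).2 := by
  induction cs with
  | nil => simp [pvSplit1]
  | cons c rest ih =>
    by_cases h : c = sep <;> simp [pvSplit1, h, ih]

theorem pvSplitOn_go_char (sep : Char) :
    ∀ (fuel : Nat) (l cur : List Char) (hacc : List (List Char)),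
      l.length < fuel →
      PySem.Chars.splitOn.go [sep] fuel l cur hacc =
        hacc.reverse ++ (cur.reverse ++ (pvSplit1 sep l).1) :: (pvSplit1 sep l).2 := by
  intro fuel
  induction fuel with
  | zero => intro l cur hacc h; omega
  | succ n ih =>
    intro l cur hacc h
    cases l with
    | nil => simp [PySem.Chars.splitOn.go, pvSplit1]
    | cons c rest =>
      by_cases hc : c = sep
      · subst hc
        rw [PySem.Chars.splitOn.go]
        simp only [List.isPrefixOf, BEq.rfl, Bool.and_true, if_pos, List.length_cons,
          List.length_nil, List.drop_succ_cons, List.drop_zero]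
        rw [ih rest [] (cur.reverse :: hacc) (by simpa using Nat.lt_of_succ_lt_succ h)]
        simp [pvSplit1]
      · rw [PySem.Chars.splitOn.go]
        have : [sep].isPrefixOf (c :: rest) = false := by
          simp [List.isPrefixOf]; intro h'; exact absurd h'.symm hc
        rw [this]
        simp only [if_neg Bool.false_ne_true]
        rw [ih rest (c :: cur) hacc (by simpa using Nat.lt_of_succ_lt_succ h)]
        simp [pvSplit1, hc]

theorem pvSplitOn_eq (sep : Char) (cs : List Char) :
    PySem.Chars.splitOn cs [sep] = (pvSplit1 sep cs).1 :: (pvSplit1 sep cs).2 := by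
  rw [PySem.Chars.splitOn, pvSplitOn_go_char sep (cs.length+1) cs [] [] (by omega)]
  simp

def pvLineA (r p : List Char) : List Char :=
  if p.take 4 = "--- ".toList ∨ p.take 4 = "+++ ".toList then p.take 4 ++ r else p

theorem pvStartswith_take (pre p : List Char) (h : pre.length = 4) :
    PySem.Chars.startswith p pre = true ↔ p.take 4 = pre := by
  rw [PySem.Chars.startswith_iff, List.prefix_iff_eq_take, h]
  exact eq_comm

theorem pvLineA_eq (r : String) (p : List Char) :
    ((if PySem.Str.startswith (String.ofList p) "--- " ||
          PySem.Str.startswith (String.ofList p) "+++ " then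
        if ((PySem.Str.split? (String.ofList p) " ").getD []).length > 1 then
          ((PySem.List.pyGet? ((PySem.Str.split? (String.ofList p) " ").getD []) 0).getD "")
            ++ " " ++ r
        else String.ofList p
      else String.ofList p) : String).toList = pvLineA r.toList p := by
  by_cases h1 : p.take 4 = "--- ".toList
  · obtain ⟨t, ht⟩ : ∃ t, p = "--- ".toList ++ t := by
      refine ⟨p.drop 4, ?_⟩
      conv_lhs => rw [← List.take_append_drop 4 p, h1]
    subst ht
    have hnn : ∀ x : Nat, (0:Int) ≤ (x:Int) + 1 := by intro x; positivity
    simp [PySem.Str.startswith, pvStartswith_take, PySem.Str.split?, PySem.Chars.split?,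
      pvLineA, PySem.List.pyGet?, PySem.List.pyIdx?, pvSplitOn_eq, pvSplit1, hnn]
  · by_cases h2 : p.take 4 = "+++ ".toList
    · obtain ⟨t, ht⟩ : ∃ t, p = "+++ ".toList ++ t := by
        refine ⟨p.drop 4, ?_⟩
        conv_lhs => rw [← List.take_append_drop 4 p, h2]
      subst ht
      have hnn : ∀ x : Nat, (0:Int) ≤ (x:Int) + 1 := by intro x; positivity
      simp [PySem.Str.startswith, pvStartswith_take, PySem.Str.split?, PySem.Chars.split?,
        pvLineA, PySem.List.pyGet?, PySem.List.pyIdx?, pvSplitOn_eq, pvSplit1, hnn]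
    · have s1 : PySem.Chars.startswith p "--- ".toList = false := by
        rw [Bool.eq_false_iff]
        intro hc; exact h1 ((pvStartswith_take _ _ (by decide)).mp hc)
      have s2 : PySem.Chars.startswith p "+++ ".toList = false := by
        rw [Bool.eq_false_iff]
        intro hc; exact h2 ((pvStartswith_take _ _ (by decide)).mp hc)
      simp only [PySem.Str.startswith, String.toList_ofList]
      norm_num [s1, s2, pvLineA, h1, h2]

theorem pvJoin_scan (r : List Char) (cs : List Char) :
    PySem.Chars.join ['\n']
      (((pvSplit1 '\n' cs).1 :: (pvSplit1 '\n' cs).2).map (pvLineA r)) =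
      pvScan r cs := by
  rw [pvScan]
  cases hd : cs.dropWhile (· ≠ '\n') with
  | nil =>
    simp only [pvSplit1_fst, pvSplit1_snd, hd]
    simp [PySem.Chars.join_singleton, pvLineA]
  | cons c rest =>
    have ih := pvJoin_scan r rest
    have hsnd : (pvSplit1 '\n' cs).2 = (pvSplit1 '\n' rest).1 :: (pvSplit1 '\n' rest).2 := by
      rw [pvSplit1_snd, hd]
    rw [hsnd]
    simp only [List.map_cons] at ih ⊢
    rw [PySem.Chars.join_cons_cons, ih]
    simp [pvLineA, pvSplit1_fst]
termination_by cs.length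
decreasing_by
  have h1 : (cs.dropWhile (· ≠ '\n')).length ≤ cs.length := List.length_dropWhile_le _ _
  rw [hd] at h1; simp at h1; omega

-- take 4 of a line (takeWhile up to '\n') equals take 4 of the raw string, for the
-- two newline-free 4-char prefixes.
theorem pvTake4_line (cs : List Char) (p : List Char) (hp : p.length = 4)
    (hnl : '\n' ∉ p) :
    ((cs.takeWhile (· ≠ '\n')).take 4 = p ↔ cs.take 4 = p) := by
  constructor
  · intro h
    have hpre : (cs.takeWhile (· ≠ '\n')).take 4 <+: cs :=
      (List.take_prefix _ _).trans (List.takeWhile_prefix _)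
    rw [h] at hpre
    rw [List.prefix_iff_eq_take, hp] at hpre
    exact hpre.symm
  · intro h
    have hall : ∀ c ∈ cs.take 4, c ≠ '\n' := by
      intro c hc; rw [h] at hc; exact fun he => hnl (he ▸ hc)
    -- take 4 (takeWhile q cs) = take 4 cs when all of take 4 cs satisfy q
    suffices hgen : ∀ (n : Nat) (cs : List Char),
        (∀ c ∈ cs.take n, c ≠ '\n') → (cs.takeWhile (· ≠ '\n')).take n = cs.take n by
      rw [hgen 4 cs hall]; exact h
    intro n
    induction n with
    | zero => intro cs _; simp
    | succ m ih =>
      intro cs hall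
      cases cs with
      | nil => simp
      | cons c rest =>
        have hc : c ≠ '\n' := hall c (by simp)
        rw [List.takeWhile_cons_of_pos (by simpa using hc)]
        simp only [List.take_succ_cons]
        rw [ih rest (fun d hd => hall d (by simp [hd]))]

-- pvReSub in copy mode: copies the current line and its newline, then resumes at a
-- line start.
theorem pvReSub_false (r : List Char) (cs : List Char) :
    pvReSub r false cs =
      cs.takeWhile (· ≠ '\n') ++
        (match cs.dropWhile (· ≠ '\n') with
         | [] => []
         | _ :: rest => '\n' :: pvReSub r true rest) := by
  induction cs with
  | nil => simp [pvReSub]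
  | cons c rest ih =>
    by_cases hc : c = '\n'
    · subst hc
      rw [pvReSub]
      simp [List.takeWhile_cons_of_neg, List.dropWhile_cons_of_neg]
    · rw [pvReSub]
      rw [dif_neg (by simp)]
      rw [List.takeWhile_cons_of_pos (by simpa using hc),
        List.dropWhile_cons_of_pos (by simpa using hc)]
      simp [hc, ih]

theorem pvDropWhile_head (p : Char → Bool) (l : List Char) (d : Char) (rest' : List Char)
    (hd : l.dropWhile p = d :: rest') : p d = false := by
  induction l with
  | nil => simp at hd
  | cons c rest ih =>
    by_cases hc : p c
    · rw [List.dropWhile_cons_of_pos hc] at hd; exact ih hd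
    · rw [List.dropWhile_cons_of_neg hc] at hd
      cases hd; simpa using hc

theorem pvReSub_eq_scan (r : List Char) (cs : List Char) :
    pvReSub r true cs = pvScan r cs := by
  by_cases hm : cs.take 4 = "--- ".toList ∨ cs.take 4 = "+++ ".toList
  · -- a header match at this line start
    obtain ⟨c, rest, hcs⟩ : ∃ c rest, cs = c :: rest := by
      cases cs with
      | nil => exfalso; rcases hm with h | h <;> simp at h
      | cons c rest => exact ⟨c, rest, rfl⟩
    subst hcs
    rw [pvReSub, dif_pos ⟨rfl, hm⟩, pvScan]
    have hline : ((c :: rest).takeWhile (· ≠ '\n')).take 4 = (c :: rest).take 4 := by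
      rcases hm with h | h <;>
        rw [(pvTake4_line (c :: rest) _ (by decide) (by decide)).mpr h, h]
    rw [hline, if_pos hm]
    cases hd : (c :: rest).dropWhile (· ≠ '\n') with
    | nil => rw [pvReSub]; simp
    | cons d rest' =>
      have hdnl : d = '\n' := by
        have := pvDropWhile_head _ _ _ _ hd
        simpa using this
      subst hdnl
      have hlen : rest'.length < (c :: rest).length := by
        have := List.length_dropWhile_le (fun x => decide (x ≠ '\n')) (c :: rest)
        rw [hd] at this; simp at this ⊢; omega
      rw [pvReSub, dif_neg (by simp)]
      simp [pvReSub_eq_scan r rest']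
  · -- no match at this line start: both sides copy the line verbatim
    cases cs with
    | nil => rw [pvReSub, pvScan]; simp
    | cons c rest =>
      have hcopy : pvReSub r true (c :: rest) = pvReSub r false (c :: rest) := by
        rw [pvReSub, pvReSub, dif_neg (by rintro ⟨-, h⟩; exact hm h),
          dif_neg (by rintro ⟨h, -⟩; simp at h)]
      rw [hcopy, pvReSub_false, pvScan]
      have hnl : ¬(((c :: rest).takeWhile (· ≠ '\n')).take 4 = "--- ".toList ∨
          ((c :: rest).takeWhile (· ≠ '\n')).take 4 = "+++ ".toList) := by
        rintro (h | h)
        · exact hm (Or.inl ((pvTake4_line (c :: rest) _ (by decide) (by decide)).mp h))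
        · exact hm (Or.inr ((pvTake4_line (c :: rest) _ (by decide) (by decide)).mp h))
      rw [if_neg hnl]
      cases hd : (c :: rest).dropWhile (· ≠ '\n') with
      | nil => simp
      | cons d rest' =>
        have hlen : rest'.length < (c :: rest).length := by
          have := List.length_dropWhile_le (fun x => decide (x ≠ '\n')) (c :: rest)
          rw [hd] at this; simp at this ⊢; omega
        simp [pvReSub_eq_scan r rest']
termination_by cs.length
decreasing_by
  · rw [hcs]; exact hlen
  · exact hlen

-- A's per-line transform at the String level (proof helper).
def pvALine (r : String) (line : String) : String :=
  if PySem.Str.startswith line "--- " || PySem.Str.startswith line "+++ " then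
    if ((PySem.Str.split? line " ").getD []).length > 1 then
      ((PySem.List.pyGet? ((PySem.Str.split? line " ").getD []) 0).getD "") ++ " " ++ r
    else line
  else line

-- ===== VERDICT (by name: the statement is the Claim_ definition above) =====
theorem replace_diff_paths_spec : Claim_equal_replace_diff_paths := by
  intro d r _hd
  unfold Spec_replace_diff_paths
  simp only [replace_diff_paths, replace_diff_paths_alt]
  have hbody : (fun (acc : List String) (line : String) =>
      if PySem.Str.startswith line "--- " || PySem.Str.startswith line "+++ " then
        if ((PySem.Str.split? line " ").getD []).length > 1 then
          acc ++ [((PySem.List.pyGet? ((PySem.Str.split? line " ").getD []) 0).getD "")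
            ++ " " ++ r]
        else acc ++ [line]
      else acc ++ [line]) = fun acc line => acc ++ [pvALine r line] := by
    funext acc line
    simp only [pvALine]
    split_ifs <;> rfl
  rw [hbody, PySem.List.foldl_append_singleton_eq_map]
  have hsep : ("\n" : String).toList = ['\n'] := rfl
  have hsplit : (PySem.Str.split? d "\n").getD [] =
      (PySem.Chars.splitOn d.toList ['\n']).map String.ofList := by
    rw [PySem.Str.split?, hsep, PySem.Chars.split?]
    rfl
  rw [hsplit]
  rw [PySem.Str.join, hsep]
  rw [pvReSub_eq_scan]
  congr 1
  rw [List.nil_append, List.map_map, List.map_map]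
  simp only [Function.comp_def]
  have hmap : ∀ p : List Char, (pvALine r (String.ofList p)).toList = pvLineA r.toList p := by
    intro p
    simp only [pvALine]
    exact pvLineA_eq r p
  rw [List.map_congr_left (fun p _ => hmap p)]
  rw [pvSplitOn_eq '\n' d.toList]
  exact pvJoin_scan r.toList d.toList
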